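-- pv_equiv track=rewrite | github.com/sphinx-contrib/confluencebuilder | sphinxcontrib/confluencebuilder/storage/__init__.py | encode_storage_format
-- ===== SOURCE A (Python) =====
-- def encode_storage_format(data):
--     """
--     encodes text to be inserted directly into a storage format area
--
--     A helper used to return content that has been properly encoded and can
--     be directly placed inside a Confluence storage-format-prepared document.
--
--     Args:
--         data: the text
--
--     Returns:
--         the encoded text
--     """
--
--     STORAGE_FORMAT_REPLACEMENTS = {
--         ('<', '&lt;'),
--         ('>', '&gt;'),
--         ('"', '&quot;'),
--         ("'", '&apos;'),
--     }
--
--     # first pass needs to handle ampersand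
--     data = str(data).replace('&', '&amp;')
--
--     for find, encoded in STORAGE_FORMAT_REPLACEMENTS:
--         data = data.replace(find, encoded)
--
--     return data
-- ===== SOURCE B (Python) =====
-- _TABLE = str.maketrans({
--     '&': '&amp;',
--     '<': '&lt;',
--     '>': '&gt;',
--     '"': '&quot;',
--     "'": '&apos;',
-- })
--
--
-- def encode_storage_format(data):
--     """
--     encodes text to be inserted directly into a storage format area
--
--     Single-pass variant: one translation-table traversal instead of five
--     sequential full-string replace scans.
--     """
--     return str(data).translate(_TABLE)
-- ===== Notes on version B (the rewrite author's own statement) =====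
-- stated objective: idiomatic
-- what changed: Replaced five sequential full-string .replace passes (ampersand first, then four entities) with a single str.translate pass over a precomputed maketrans table mapping all five characters simultaneously.
import Mathlib
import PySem

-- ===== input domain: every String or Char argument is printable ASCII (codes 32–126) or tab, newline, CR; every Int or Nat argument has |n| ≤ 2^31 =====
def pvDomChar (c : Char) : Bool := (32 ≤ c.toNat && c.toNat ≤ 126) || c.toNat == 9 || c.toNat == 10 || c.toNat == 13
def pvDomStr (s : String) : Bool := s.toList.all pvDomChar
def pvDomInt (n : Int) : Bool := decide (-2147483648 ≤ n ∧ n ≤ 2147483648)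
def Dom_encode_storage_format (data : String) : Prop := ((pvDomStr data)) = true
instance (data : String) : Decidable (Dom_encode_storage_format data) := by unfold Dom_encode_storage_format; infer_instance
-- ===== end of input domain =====

-- B replaces A's five sequential full-string replace passes with one per-character translation pass (idiomatic str.translate).


-- ===== PORT A =====
-- str(data) is the identity on a String argument; the set's iteration order does not
-- affect the result (the four replacements are pairwise non-interfering), ported in a fixed order.
def encode_storage_format (data : String) : String :=
  let d1 := PySem.Str.replace data "&" "&amp;"
  let d2 := PySem.Str.replace d1 "<" "&lt;"
  let d3 := PySem.Str.replace d2 ">" "&gt;"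
  let d4 := PySem.Str.replace d3 "\"" "&quot;"
  PySem.Str.replace d4 "'" "&apos;"

-- ===== PORT B =====
-- the maketrans table of Source B as a per-character mapping; translate = one flatMap pass
def escChar (c : Char) : List Char :=
  if c = '&' then "&amp;".toList
  else if c = '<' then "&lt;".toList
  else if c = '>' then "&gt;".toList
  else if c = '"' then "&quot;".toList
  else if c = '\'' then "&apos;".toList
  else [c]

def encode_storage_format_alt (data : String) : String :=
  String.ofList (data.toList.flatMap escChar)

-- ===== PRECONDITION & SPEC =====
def Spec_encode_storage_format (data : String) (out : String) : Prop := out = encode_storage_format_alt data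
instance (data : String) (out : String) : Decidable (Spec_encode_storage_format data out) := by unfold Spec_encode_storage_format; infer_instance

-- ===== CLAIM (what is proved, stated in full; the proofs are below) =====
def Claim_equal_encode_storage_format : Prop := ∀ (data : String), Dom_encode_storage_format data → Spec_encode_storage_format data (encode_storage_format data)

-- ===== LEMMAS AND PROOFS =====

-- replacing a single character is a per-character flatMap
lemma replace_go_single (c : Char) (n : List Char) :
    ∀ (fuel : Nat) (l acc : List Char), l.length ≤ fuel →
      PySem.Chars.replace.go [c] n fuel l acc
        = acc.reverse ++ l.flatMap (fun x => if x = c then n else [x]) := by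
  intro fuel
  induction fuel with
  | zero =>
    intro l acc h
    have : l = [] := List.eq_nil_of_length_eq_zero (Nat.le_zero.mp h)
    subst this
    simp [PySem.Chars.replace.go]
  | succ f ih =>
    intro l acc h
    cases l with
    | nil => simp [PySem.Chars.replace.go]
    | cons x t =>
      by_cases hx : x = c
      · subst hx
        have hpre : [x].isPrefixOf (x :: t) = true := by
          simp [List.isPrefixOf]
        rw [PySem.Chars.replace.go, if_pos hpre]
        have hd : List.drop [x].length (x :: t) = t := rfl
        rw [hd, ih t (n.reverse ++ acc) (by simpa using h)]
        simp
      · have hpre : ¬ ([c].isPrefixOf (x :: t) = true) := by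
          simp [List.isPrefixOf]
          exact fun hcx => hx hcx.symm
        rw [PySem.Chars.replace.go, if_neg hpre]
        rw [ih t (x :: acc) (by simpa using h)]
        simp [hx]

lemma replace_single (s : List Char) (c : Char) (n : List Char) :
    PySem.Chars.replace s [c] n = s.flatMap (fun x => if x = c then n else [x]) := by
  rw [PySem.Chars.replace]
  rw [if_neg (by simp)]
  exact replace_go_single c n s.length s [] (le_refl _)

-- the per-character functions of A's five passes, fused, equal escChar
lemma passes_fuse (x : Char) :
    List.flatMap
      (fun a =>
        List.flatMap
          (fun b =>
            List.flatMap
              (fun c2 =>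
                List.flatMap (fun d => if d = '\'' then "&apos;".toList else [d])
                  (if c2 = '"' then "&quot;".toList else [c2]))
              (if b = '>' then "&gt;".toList else [b]))
          (if a = '<' then "&lt;".toList else [a]))
      (if x = '&' then "&amp;".toList else [x]) = escChar x := by
  by_cases h1 : x = '&'; · subst h1; decide
  by_cases h2 : x = '<'; · subst h2; decide
  by_cases h3 : x = '>'; · subst h3; decide
  by_cases h4 : x = '"'; · subst h4; decide
  by_cases h5 : x = '\''; · subst h5; decide
  simp [escChar, h1, h2, h3, h4, h5]

-- ===== VERDICT (by name: the statement is the Claim_ definition above) =====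
theorem encode_storage_format_spec : Claim_equal_encode_storage_format := by
  intro data _
  unfold Spec_encode_storage_format encode_storage_format encode_storage_format_alt
  have key : (PySem.Str.replace
      (PySem.Str.replace
        (PySem.Str.replace
          (PySem.Str.replace (PySem.Str.replace data "&" "&amp;") "<" "&lt;")
          ">" "&gt;") "\"" "&quot;") "'" "&apos;").toList
      = data.toList.flatMap escChar := by
    simp only [PySem.Str.toList_replace]
    have e1 : ("&" : String).toList = ['&'] := rfl
    have e2 : ("<" : String).toList = ['<'] := rfl
    have e3 : (">" : String).toList = ['>'] := rfl
    have e4 : ("\"" : String).toList = ['"'] := rfl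
    have e5 : ("'" : String).toList = ['\''] := rfl
    rw [e1, e2, e3, e4, e5]
    rw [replace_single, replace_single, replace_single, replace_single, replace_single]
    rw [List.flatMap_assoc, List.flatMap_assoc, List.flatMap_assoc, List.flatMap_assoc]
    exact List.flatMap_congr (fun x _ => passes_fuse x)
  have := congrArg String.ofList key
  rw [String.ofList_toList] at this
  exact this
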